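-- pv_equiv track=rewrite | github.com/KolmogorovLab/Wakhan | src/coverage/segmentation.py | remove_more_than_one_bp_in_a_single_bin
-- ===== SOURCE A (Python) =====
-- def remove_more_than_one_bp_in_a_single_bin(bin_size, ref_start_values, breakpoints_coordinates):
--     updated_breakpoints_coordinates = []
--     for index,val in enumerate(ref_start_values):
--         all_values = []
--         for index_bp, bp in enumerate(breakpoints_coordinates):
--             if bp >= val and bp <= val+bin_size:
--                 all_values.append(bp)
--         if len(all_values)>1:
--             updated_breakpoints_coordinates = updated_breakpoints_coordinates + [all_values[0]]
--         elif len(all_values) == 1: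
--             updated_breakpoints_coordinates = updated_breakpoints_coordinates + all_values
--     return updated_breakpoints_coordinates
-- ===== SOURCE B (Python) =====
-- def remove_more_than_one_bp_in_a_single_bin(bin_size, ref_start_values, breakpoints_coordinates):
--     # Transposed traversal: one pass over breakpoints, keeping per bin the
--     # first breakpoint (in list order) that falls inside its window.
--     firsts = [None] * len(ref_start_values)
--     for bp in breakpoints_coordinates:
--         firsts = [f if f is not None else (bp if val <= bp <= val + bin_size else None)
--                   for val, f in zip(ref_start_values, firsts)]
--     return [f for f in firsts if f is not None]
-- ===== Notes on version B (the rewrite author's own statement) =====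
-- stated objective: alternative
-- what changed: Loops are transposed: instead of rescanning all breakpoints for every bin and collecting a per-bin list, B makes one pass over the breakpoints maintaining a set-once option accumulator (first matching breakpoint) per bin, then emits the filled slots in bin order.
import Mathlib
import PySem

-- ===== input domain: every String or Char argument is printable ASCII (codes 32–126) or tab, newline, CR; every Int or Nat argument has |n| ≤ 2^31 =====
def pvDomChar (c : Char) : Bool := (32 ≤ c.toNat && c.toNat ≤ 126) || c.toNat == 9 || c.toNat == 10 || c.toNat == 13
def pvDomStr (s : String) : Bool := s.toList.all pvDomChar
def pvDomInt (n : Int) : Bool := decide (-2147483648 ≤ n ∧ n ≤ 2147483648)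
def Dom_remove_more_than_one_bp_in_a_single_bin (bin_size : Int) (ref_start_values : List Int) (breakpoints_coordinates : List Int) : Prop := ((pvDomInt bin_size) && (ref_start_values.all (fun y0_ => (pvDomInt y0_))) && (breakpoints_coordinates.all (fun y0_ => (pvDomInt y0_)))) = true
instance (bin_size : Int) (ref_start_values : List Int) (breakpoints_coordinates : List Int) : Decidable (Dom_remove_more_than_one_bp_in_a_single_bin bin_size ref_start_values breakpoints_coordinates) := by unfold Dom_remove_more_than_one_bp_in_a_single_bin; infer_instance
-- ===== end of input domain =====

-- B transposes the loops: one pass over the breakpoints with a set-once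
-- per-bin option accumulator, instead of rescanning all breakpoints per bin
-- (objective: alternative structure, same result).

-- ===== PORT A =====
def remove_more_than_one_bp_in_a_single_bin (bin_size : Int) (ref_start_values : List Int) (breakpoints_coordinates : List Int) : List Int :=
  ref_start_values.foldl (fun updated val =>
    let all_values := breakpoints_coordinates.foldl
      (fun av bp => if bp ≥ val ∧ bp ≤ val + bin_size then av ++ [bp] else av) []
    if all_values.length > 1 then updated ++ [all_values.headD 0]
    else if all_values.length = 1 then updated ++ all_values
    else updated) []

-- ===== PORT B =====
def remove_more_than_one_bp_in_a_single_bin_alt (bin_size : Int) (ref_start_values : List Int) (breakpoints_coordinates : List Int) : List Int :=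
  let firsts := breakpoints_coordinates.foldl
    (fun fs bp => List.zipWith (fun val f =>
        match f with
        | some x => some x
        | none => if val ≤ bp ∧ bp ≤ val + bin_size then some bp else none)
      ref_start_values fs)
    (ref_start_values.map (fun _ => (none : Option Int)))
  firsts.filterMap id

-- ===== PRECONDITION & SPEC =====
def Spec_remove_more_than_one_bp_in_a_single_bin (bin_size : Int) (ref_start_values : List Int) (breakpoints_coordinates : List Int) (out : List Int) : Prop := out = remove_more_than_one_bp_in_a_single_bin_alt bin_size ref_start_values breakpoints_coordinates
instance (bin_size : Int) (ref_start_values : List Int) (breakpoints_coordinates : List Int) (out : List Int) : Decidable (Spec_remove_more_than_one_bp_in_a_single_bin bin_size ref_start_values breakpoints_coordinates out) := by unfold Spec_remove_more_than_one_bp_in_a_single_bin; infer_instance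

-- ===== CLAIM (what is proved, stated in full; the proofs are below) =====
def Claim_equal_remove_more_than_one_bp_in_a_single_bin : Prop := ∀ (bin_size : Int) (ref_start_values : List Int) (breakpoints_coordinates : List Int), Dom_remove_more_than_one_bp_in_a_single_bin bin_size ref_start_values breakpoints_coordinates → Spec_remove_more_than_one_bp_in_a_single_bin bin_size ref_start_values breakpoints_coordinates (remove_more_than_one_bp_in_a_single_bin bin_size ref_start_values breakpoints_coordinates)

-- ===== LEMMAS AND PROOFS =====

-- the window predicate both sides test
def pvQ (bin_size val bp : Int) : Bool := decide (val ≤ bp ∧ bp ≤ val + bin_size)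

-- A's inner loop collects exactly the filtered list
lemma pvA_inner (bin_size val : Int) : ∀ (bps : List Int) (acc : List Int),
    bps.foldl (fun av bp => if bp ≥ val ∧ bp ≤ val + bin_size then av ++ [bp] else av) acc
      = acc ++ bps.filter (pvQ bin_size val) := by
  intro bps
  induction bps with
  | nil => intro acc; simp
  | cons b t ih =>
    intro acc
    simp only [List.foldl_cons, List.filter_cons, pvQ, ge_iff_le]
    by_cases h : val ≤ b ∧ b ≤ val + bin_size
    · simp [h, ih]
    · simp [h, ih]

-- A's branch on all_values equals appending the head (if any)
lemma pvA_branch (u l : List Int) :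
    (if l.length > 1 then u ++ [l.headD 0]
     else if l.length = 1 then u ++ l
     else u) = u ++ l.head?.toList := by
  cases l with
  | nil => simp
  | cons a t => cases t <;> simp

-- folding "append the optional head" is filterMap
lemma pvFoldl_toList {α β : Type} (g : α → Option β) : ∀ (l : List α) (acc : List β),
    l.foldl (fun a x => a ++ (g x).toList) acc = acc ++ l.filterMap g := by
  intro l
  induction l with
  | nil => intro acc; simp
  | cons x t ih =>
    intro acc
    simp only [List.foldl_cons, List.filterMap_cons]
    cases hg : g x <;> simp [ih]

-- head of a filter is find?
lemma pvHead_filter {α : Type} (q : α → Bool) : ∀ (l : List α),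
    (l.filter q).head? = l.find? q := by
  intro l
  induction l with
  | nil => rfl
  | cons a t ih =>
    by_cases h : q a = true
    · simp [h]
    · simp [h, ih]

-- A computes the per-bin first-match map
lemma pvA_eq (bin_size : Int) (rsv bps : List Int) :
    remove_more_than_one_bp_in_a_single_bin bin_size rsv bps
      = rsv.filterMap (fun val => bps.find? (pvQ bin_size val)) := by
  unfold remove_more_than_one_bp_in_a_single_bin
  have h1 : ∀ (updated : List Int) (val : Int),
      (let all_values := bps.foldl
        (fun av bp => if bp ≥ val ∧ bp ≤ val + bin_size then av ++ [bp] else av) []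
       if all_values.length > 1 then updated ++ [all_values.headD 0]
       else if all_values.length = 1 then updated ++ all_values
       else updated)
      = updated ++ (bps.find? (pvQ bin_size val)).toList := by
    intro updated val
    simp only [pvA_inner, List.nil_append, pvA_branch, pvHead_filter]
  calc rsv.foldl (fun updated val =>
        let all_values := bps.foldl
          (fun av bp => if bp ≥ val ∧ bp ≤ val + bin_size then av ++ [bp] else av) []
        if all_values.length > 1 then updated ++ [all_values.headD 0]
        else if all_values.length = 1 then updated ++ all_values
        else updated) []
      = rsv.foldl (fun updated val => updated ++ (bps.find? (pvQ bin_size val)).toList) [] := by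
        apply PySem.List.foldl_congr_mem
        intro a x _; exact h1 a x
    _ = rsv.filterMap (fun val => bps.find? (pvQ bin_size val)) := by
        rw [pvFoldl_toList]; simp

-- zipWith of a list against a map of itself is a map
lemma pvZipWith_map_self {α β γ : Type} (f : α → β → γ) (g : α → β) : ∀ (l : List α),
    List.zipWith f l (l.map g) = l.map (fun a => f a (g a)) := by
  intro l
  induction l with
  | nil => rfl
  | cons a t ih => simp [ih]

-- B's fold keeps, per bin, the first matching breakpoint
lemma pvB_fold (bin_size : Int) (rsv : List Int) : ∀ (bps : List Int) (F : Int → Option Int),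
    bps.foldl (fun fs bp => List.zipWith (fun val f =>
        match f with
        | some x => some x
        | none => if val ≤ bp ∧ bp ≤ val + bin_size then some bp else none)
      rsv fs) (rsv.map F)
    = rsv.map (fun val => (F val).or (bps.find? (pvQ bin_size val))) := by
  intro bps
  induction bps with
  | nil =>
    intro F; simp
  | cons bp t ih =>
    intro F
    simp only [List.foldl_cons]
    rw [pvZipWith_map_self]
    have := ih (fun val =>
      match F val with
      | some x => some x
      | none => if val ≤ bp ∧ bp ≤ val + bin_size then some bp else none)
    rw [this]
    apply List.map_congr_left
    intro val _
    cases hF : F val with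
    | some x => simp [Option.or]
    | none =>
      simp only [Option.none_or, List.find?_cons, pvQ]
      by_cases h : val ≤ bp ∧ bp ≤ val + bin_size
      · simp [h, Option.or]
      · simp [h]

lemma pvB_eq (bin_size : Int) (rsv bps : List Int) :
    remove_more_than_one_bp_in_a_single_bin_alt bin_size rsv bps
      = rsv.filterMap (fun val => bps.find? (pvQ bin_size val)) := by
  unfold remove_more_than_one_bp_in_a_single_bin_alt
  rw [pvB_fold bin_size rsv bps (fun _ => none)]
  simp [List.filterMap_map]

-- ===== VERDICT (by name: the statement is the Claim_ definition above) =====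
theorem remove_more_than_one_bp_in_a_single_bin_spec : Claim_equal_remove_more_than_one_bp_in_a_single_bin := by
  intro bin_size rsv bps _
  unfold Spec_remove_more_than_one_bp_in_a_single_bin
  rw [pvA_eq, pvB_eq]
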